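-- pv_equiv track=rewrite | github.com/patrick-projects/ad-attack-framework | src/modules/attacks/privesc_attacks.py | _check_service_vulnerable_native
-- ===== SOURCE A (Python) =====
-- def _check_service_vulnerable_native(perms_output: str) -> bool:
--     """Check if service is vulnerable using built-in tools output"""
--     try:
--         # Check for weak permissions in icacls output
--         weak_perms = ['F', 'M', 'W']  # Full, Modify, Write
--         for perm in weak_perms:
--             if f":(OI)(CI){perm}" in perms_output:
--                 return True
--         return False
--     except Exception:
--         return False
-- ===== SOURCE B (Python) =====
-- def _check_service_vulnerable_native(perms_output: str) -> bool:
--     """Check if service is vulnerable using built-in tools output.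
--
--     Single left-to-right scan: at each position compare the fixed prefix
--     ":(OI)(CI)" once and then test the following character against the
--     class "FMW", instead of three separate substring passes.
--     """
--     try:
--         prefix = ":(OI)(CI)"
--         n = len(prefix)
--         for i in range(len(perms_output) - n):
--             if perms_output[i:i + n] == prefix and perms_output[i + n] in "FMW":
--                 return True
--         return False
--     except Exception:
--         return False
-- ===== Notes on version B (the rewrite author's own statement) =====
-- stated objective: alternative
-- what changed: Replaces the three separate substring-membership passes (one per weak permission letter) by a single left-to-right scan that compares the fixed ACL prefix once per position and then tests the following character against the three-letter permission class.
import Mathlib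
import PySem

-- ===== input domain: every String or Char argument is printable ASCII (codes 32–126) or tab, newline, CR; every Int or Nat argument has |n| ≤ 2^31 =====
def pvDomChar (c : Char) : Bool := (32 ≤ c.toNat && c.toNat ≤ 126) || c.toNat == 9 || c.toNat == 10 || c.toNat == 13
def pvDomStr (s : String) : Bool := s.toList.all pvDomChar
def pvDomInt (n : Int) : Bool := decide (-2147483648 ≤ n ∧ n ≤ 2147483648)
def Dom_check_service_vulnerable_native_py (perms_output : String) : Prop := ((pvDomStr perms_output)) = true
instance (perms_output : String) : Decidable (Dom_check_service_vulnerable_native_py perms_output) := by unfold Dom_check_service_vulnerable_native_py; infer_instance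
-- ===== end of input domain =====

-- B replaces A's three substring-membership passes by one left-to-right scan
-- matching the fixed prefix once and then a character class; same results.

-- ===== PORT A =====
-- the for-loop over ['F','M','W'] with early return True
def pvALoop (perms_output : String) : List String → Bool
  | [] => false
  | perm :: rest =>
      if PySem.Str.isIn (":(OI)(CI)" ++ perm) perms_output then true
      else pvALoop perms_output rest

def check_service_vulnerable_native_py (perms_output : String) : Bool :=
  pvALoop perms_output ["F", "M", "W"]

-- ===== PORT B =====
-- the fixed prefix Source B compares by slicing
def pvPrefix : List Char := [':', '(', 'O', 'I', ')', '(', 'C', 'I', ')']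

-- Source B's loop body at one position: slice == prefix and next char in "FMW"
def pvMatchAt (l : List Char) : Bool :=
  pvPrefix.isPrefixOf l &&
    (match l.drop 9 with
     | c :: _ => c == 'F' || c == 'M' || c == 'W'
     | [] => false)

-- Source B's single scan over the positions of the string
def pvScan : List Char → Bool
  | [] => false
  | c :: rest => pvMatchAt (c :: rest) || pvScan rest

def check_service_vulnerable_native_py_alt (perms_output : String) : Bool :=
  pvScan perms_output.toList

-- ===== PRECONDITION & SPEC =====
def Spec_check_service_vulnerable_native_py (perms_output : String) (out : Bool) : Prop := out = check_service_vulnerable_native_py_alt perms_output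
instance (perms_output : String) (out : Bool) : Decidable (Spec_check_service_vulnerable_native_py perms_output out) := by unfold Spec_check_service_vulnerable_native_py; infer_instance

-- ===== CLAIM (what is proved, stated in full; the proofs are below) =====
def Claim_equal_check_service_vulnerable_native_py : Prop := ∀ (perms_output : String), Dom_check_service_vulnerable_native_py perms_output → Spec_check_service_vulnerable_native_py perms_output (check_service_vulnerable_native_py perms_output)

-- ===== LEMMAS AND PROOFS =====

-- at one position, the match succeeds iff one of A's three patterns is a prefix
theorem pvMatchAt_iff (l : List Char) :
    pvMatchAt l = true ↔
      (pvPrefix ++ ['F'] <+: l) ∨ (pvPrefix ++ ['M'] <+: l) ∨ (pvPrefix ++ ['W'] <+: l) := by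
  unfold pvMatchAt
  by_cases h : pvPrefix <+: l
  · obtain ⟨t, rfl⟩ := h
    have hd : (pvPrefix ++ t).drop 9 = t := by
      simp [pvPrefix]
    rw [hd]
    simp only [List.prefix_append_right_inj]
    cases t with
    | nil => simp
    | cons c t' =>
      simp [List.cons_prefix_cons]
      tauto
  · constructor
    · intro hm
      exact absurd (List.isPrefixOf_iff_prefix.mp (Bool.and_elim_left hm)) h
    · rintro (hp | hp | hp) <;>
        exact absurd ((List.prefix_append pvPrefix _).trans hp) h

-- the scan succeeds iff some suffix matches at its head
theorem pvScan_iff (l : List Char) :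
    pvScan l = true ↔ ∃ t, t <:+ l ∧ pvMatchAt t = true := by
  induction l with
  | nil =>
    simp only [pvScan]
    constructor
    · intro h; exact absurd h (by simp)
    · rintro ⟨t, ht, hm⟩
      rw [List.suffix_nil.mp ht] at hm
      simp [pvMatchAt] at hm
  | cons c rest ih =>
    simp only [pvScan, Bool.or_eq_true, ih]
    constructor
    · rintro (h | ⟨t, ht, hm⟩)
      · exact ⟨c :: rest, List.suffix_refl _, h⟩
      · exact ⟨t, ht.trans (List.suffix_cons c rest), hm⟩
    · rintro ⟨t, ht, hm⟩
      rcases ht with ⟨u, hu⟩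
      cases u with
      | nil => left; simpa [← hu] using hm
      | cons x u' =>
        right
        refine ⟨t, ?_, hm⟩
        exact ⟨u', by simpa using congrArg List.tail hu⟩

-- B finds a match iff one of A's patterns occurs as an infix
theorem pvScan_eq_infix (l : List Char) :
    pvScan l = true ↔
      (pvPrefix ++ ['F'] <:+: l) ∨ (pvPrefix ++ ['M'] <:+: l) ∨ (pvPrefix ++ ['W'] <:+: l) := by
  rw [pvScan_iff]
  simp only [List.infix_iff_prefix_suffix, pvMatchAt_iff]
  constructor
  · rintro ⟨t, ht, (h | h | h)⟩
    · exact Or.inl ⟨t, h, ht⟩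
    · exact Or.inr (Or.inl ⟨t, h, ht⟩)
    · exact Or.inr (Or.inr ⟨t, h, ht⟩)
  · rintro (⟨t, h, ht⟩ | ⟨t, h, ht⟩ | ⟨t, h, ht⟩)
    · exact ⟨t, ht, Or.inl h⟩
    · exact ⟨t, ht, Or.inr (Or.inl h)⟩
    · exact ⟨t, ht, Or.inr (Or.inr h)⟩

-- ===== VERDICT (by name: the statement is the Claim_ definition above) =====
theorem check_service_vulnerable_native_py_spec : Claim_equal_check_service_vulnerable_native_py := by
  intro s _
  unfold Spec_check_service_vulnerable_native_py check_service_vulnerable_native_py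
  unfold check_service_vulnerable_native_py_alt
  rw [Bool.eq_iff_iff, pvScan_eq_infix]
  simp only [pvALoop, Bool.if_true_left, Bool.or_eq_true, PySem.Str.isIn_iff_infix]
  have hF : ((":(OI)(CI)" ++ "F" : String)).toList = pvPrefix ++ ['F'] := by decide
  have hM : ((":(OI)(CI)" ++ "M" : String)).toList = pvPrefix ++ ['M'] := by decide
  have hW : ((":(OI)(CI)" ++ "W" : String)).toList = pvPrefix ++ ['W'] := by decide
  rw [hF, hM, hW]
  simp only [decide_eq_true_eq, Bool.false_eq_true, or_false]
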